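-- pv_equiv track=rewrite | github.com/ananthchellappa/python | circuits/node_counter_3p6.py | aggregate_by_level
-- ===== SOURCE A (Python) =====
-- from collections import Counter
--
-- def split_instance_segments(node):
--     # type: (str) -> List[str]
--     """
--     Extract instance segments from a node name (Option B).
--
--     Rules:
--       - Split node on '.' into segments.
--       - If there is only one segment, return [] (no hierarchy).
--       - All segments except the last are treated as instance names.
--       - For each segment, strip any suffix after ':' (e.g. 'M3:d' -> 'M3').
--       - Empty segments after stripping are ignored.
--
--     Examples:
--       'top.u1.u2.net123'      -> ['top', 'u1', 'u2']
--       'soc.chip.xpll.vctrl'   -> ['soc', 'chip', 'xpll']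
--       'net123'                -> []
--       'xtop.xa2.M3:d'         -> ['xtop', 'xa2', 'M3']
--     """
--     parts = node.split(".")
--     if len(parts) <= 1:
--         return []
--
--     insts = []  # type: List[str]
--     # All but the last segment are considered instances
--     for seg in parts[:-1]:
--         core = seg.split(":", 1)[0]
--         if core:
--             insts.append(core)
--     return insts
--
-- def instance_prefixes(insts, max_levels):
--     # type: (Sequence[str], int) -> List[str]
--     """
--     Given a list of instance segments, return cumulative prefixes up to
--     `max_levels` (and at most len(insts)).
--
--     Example:
--         insts      = ['top', 'u1', 'u2']
--         max_levels = 3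
--         -> ['top', 'top.u1', 'top.u1.u2']
--     """
--     out = []  # type: List[str]
--     limit = min(max_levels, len(insts))
--     for i in range(1, limit + 1):
--         out.append(".".join(insts[:i]))
--     return out
--
-- def aggregate_by_level(nodes, max_levels):
--     # type: (Sequence[str], int) -> Tuple[int, List[Counter]]
--     """
--     For each node, derive instance prefixes and count contributions
--     at each level up to max_levels.
--
--     Returns (total_nodes, [Counter_for_level0, Counter_for_level1, ...]).
--     """
--     total = len(nodes)
--     level_counters = [Counter() for _ in range(max_levels)]  # type: List[Counter]
--
--     for node in nodes:
--         insts = split_instance_segments(node)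
--         if not insts:
--             continue
--         prefixes = instance_prefixes(insts, max_levels)
--         for lvl, pref in enumerate(prefixes):
--             level_counters[lvl][pref] += 1
--
--     return total, level_counters
-- ===== SOURCE B (Python) =====
-- from collections import Counter
--
-- def aggregate_by_level(nodes, max_levels):
--     # One flat Counter keyed by (level, prefix): prefixes are built incrementally
--     # while streaming each node's segments (with an early break at max_levels),
--     # then the flat counts are distributed into the per-level Counters.
--     flat = Counter()
--     for node in nodes:
--         lvl = 0
--         pref = ""
--         for seg in node.split(".")[:-1]:
--             if lvl >= max_levels:
--                 break
--             core = seg.split(":", 1)[0]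
--             if not core:
--                 continue
--             pref = core if lvl == 0 else pref + "." + core
--             flat[(lvl, pref)] += 1
--             lvl += 1
--     counters = [Counter() for _ in range(max_levels)]
--     for (lvl, pref), c in flat.items():
--         counters[lvl][pref] += c
--     return len(nodes), counters
-- ===== Notes on version B (the rewrite author's own statement) =====
-- stated objective: alternative
-- what changed: Replaces A's per-node staging (materialize the instance list, then a cumulative-prefix list, then bump a pre-sized list of Counters) with a single flat Counter keyed by (level, prefix) pairs filled by streaming each node's segments once with an incrementally extended prefix and an early break at max_levels, and a final pass distributing the flat counts into the per-level Counters.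
import Mathlib
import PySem

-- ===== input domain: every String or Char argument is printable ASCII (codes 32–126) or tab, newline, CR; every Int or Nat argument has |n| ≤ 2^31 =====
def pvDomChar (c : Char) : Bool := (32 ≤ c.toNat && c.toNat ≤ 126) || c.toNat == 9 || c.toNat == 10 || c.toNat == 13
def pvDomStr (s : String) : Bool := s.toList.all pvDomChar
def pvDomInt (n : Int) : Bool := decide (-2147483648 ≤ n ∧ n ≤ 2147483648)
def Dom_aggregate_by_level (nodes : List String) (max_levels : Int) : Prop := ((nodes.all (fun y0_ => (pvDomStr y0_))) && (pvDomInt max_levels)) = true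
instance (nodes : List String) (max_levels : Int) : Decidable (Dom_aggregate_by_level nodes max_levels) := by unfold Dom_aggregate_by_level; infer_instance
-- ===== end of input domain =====

-- B replaces A's staged per-node lists and pre-sized Counter list with one flat
-- Counter keyed by (level, prefix), filled by streaming each node's segments with an
-- incrementally built prefix (early break at max_levels), then distributed per level;
-- a different decomposition at the same cost ("alternative", not claimed faster).

-- ===== PORT A =====
-- split_instance_segments
def pvSplitInstanceSegments (node : String) : List String :=
  let parts := (PySem.Str.split? node ".").getD []   -- sep "." ≠ "", never raises
  if parts.length ≤ 1 then []
  else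
    (PySem.List.slice parts none (some (-1))).foldl (fun insts seg =>
      let core := ((PySem.Str.splitMax? seg ":" 1).getD []).headD ""  -- seg.split(":",1)[0]; split is never empty
      if core ≠ "" then insts ++ [core] else insts) []

-- instance_prefixes
def pvInstancePrefixes (insts : List String) (max_levels : Int) : List String :=
  let limit := min max_levels (insts.length : Int)
  (PySem.List.pyRange 1 (limit + 1)).foldl
    (fun out i => out ++ [PySem.Str.join "." (PySem.List.slice insts none (some i))]) []

-- level_counters[lvl][pref] += 1 (lvl is an enumerate index, always 0 ≤ lvl < len)
def pvBump (cs : List (PySem.Dict String Int)) (lvl : Int) (pref : String) :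
    List (PySem.Dict String Int) :=
  match PySem.List.pyGet? cs lvl with
  | some d => cs.set lvl.toNat (d.modify pref 0 (· + 1))
  | none => cs

def aggregate_by_level (nodes : List String) (max_levels : Int) :
    Int × (List (List (String × Int))) :=
  let total : Int := nodes.length
  let level_counters : List (PySem.Dict String Int) :=
    (PySem.List.pyRange 0 max_levels).map (fun _ => PySem.Dict.empty)
  let level_counters := nodes.foldl (fun cs node =>
    let insts := pvSplitInstanceSegments node
    if insts = [] then cs
    else (PySem.List.enumerate (pvInstancePrefixes insts max_levels)).foldl
      (fun cs p => pvBump cs p.1 p.2) cs) level_counters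
  (total, level_counters.map PySem.Dict.items)

-- ===== PORT B =====
-- the inner 'for seg in node.split(".")[:-1]' loop with its break/continue:
-- state = (lvl, pref, flat); 'pref + "." + core' is ".".join([pref, core])
def pvStream (max_levels : Int) :
    List String → Int → String → PySem.Dict (Int × String) Int → PySem.Dict (Int × String) Int
  | [], _, _, flat => flat
  | seg :: rest, lvl, pref, flat =>
    if max_levels ≤ lvl then flat                       -- break
    else
      let core := ((PySem.Str.splitMax? seg ":" 1).getD []).headD ""
      if core = "" then pvStream max_levels rest lvl pref flat   -- continue
      else
        let pref' := if lvl = 0 then core else PySem.Str.join "." [pref, core]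
        pvStream max_levels rest (lvl + 1) pref' (flat.modify (lvl, pref') 0 (· + 1))

-- counters[lvl][pref] += c
def pvBumpC (cs : List (PySem.Dict String Int)) (lvl : Int) (pref : String) (c : Int) :
    List (PySem.Dict String Int) :=
  match PySem.List.pyGet? cs lvl with
  | some d => cs.set lvl.toNat (d.modify pref 0 (· + c))
  | none => cs

def aggregate_by_level_alt (nodes : List String) (max_levels : Int) :
    Int × (List (List (String × Int))) :=
  let flat := nodes.foldl (fun flat node =>
    pvStream max_levels
      (PySem.List.slice ((PySem.Str.split? node ".").getD []) none (some (-1))) 0 "" flat)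
    PySem.Dict.empty
  let counters : List (PySem.Dict String Int) :=
    (PySem.List.pyRange 0 max_levels).map (fun _ => PySem.Dict.empty)
  let counters := flat.items.foldl (fun cs q => pvBumpC cs q.1.1 q.1.2 q.2) counters
  ((nodes.length : Int), counters.map PySem.Dict.items)

-- ===== PRECONDITION & SPEC =====
def Spec_aggregate_by_level (nodes : List String) (max_levels : Int) (out : Int × (List (List (String × Int)))) : Prop := out = aggregate_by_level_alt nodes max_levels
instance (nodes : List String) (max_levels : Int) (out : Int × (List (List (String × Int)))) : Decidable (Spec_aggregate_by_level nodes max_levels out) := by unfold Spec_aggregate_by_level; infer_instance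

-- ===== CLAIM (what is proved, stated in full; the proofs are below) =====
def Claim_equal_aggregate_by_level : Prop := ∀ (nodes : List String) (max_levels : Int), Dom_aggregate_by_level nodes max_levels → Spec_aggregate_by_level nodes max_levels (aggregate_by_level nodes max_levels)

-- ===== LEMMAS AND PROOFS =====

-- the filtered instance list (the comprehension form of split_instance_segments)
def pvInsts (node : String) : List String :=
  (((PySem.Str.split? node ".").getD []).dropLast).filterMap (fun seg =>
    let core := ((PySem.Str.splitMax? seg ":" 1).getD []).headD ""
    if core ≠ "" then some core else none)

-- the (level, prefix) events pvStream emits, as a recursion over the filtered cores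
def pvEvs (ml : Int) : List String → Int → String → List (Int × String)
  | [], _, _ => []
  | c :: rest, k, pref =>
    if ml ≤ k then []
    else
      let pref' := if k = 0 then c else PySem.Str.join "." [pref, c]
      (k, pref') :: pvEvs ml rest (k + 1) pref'

def pvKey (insts : List String) (l : Nat) : String := PySem.Str.join "." (insts.take (l + 1))

def pvEvN (node : String) (ml : Int) : List (Int × String) := pvEvs ml (pvInsts node) 0 ""

def pvAllE (nodes : List String) (ml : Int) : List (Int × String) :=
  nodes.flatMap (fun n => pvEvN n ml)

def pvLevE (nodes : List String) (ml : Int) (l : Nat) : List String :=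
  (pvAllE nodes ml).filterMap (fun e => if e.1 = (l : Int) then some e.2 else none)

theorem pv_mapIdx_id {α : Type} (l : List α) : l.mapIdx (fun _ a => a) = l := by
  simp [List.mapIdx_eq_zipIdx_map]

-- A's filtering fold over segments = the comprehension
theorem pv_segs_eq (node : String) : pvSplitInstanceSegments node = pvInsts node := by
  unfold pvSplitInstanceSegments pvInsts
  dsimp only
  rw [PySem.List.slice_to_neg_one]
  by_cases h : ((PySem.Str.split? node ".").getD []).length ≤ 1
  · have hd : ((PySem.Str.split? node ".").getD []).dropLast = [] := by
      rw [← List.length_eq_zero_iff, List.length_dropLast]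
      omega
    simp [h, hd]
  · simp only [h, if_false]
    generalize ((PySem.Str.split? node ".").getD []).dropLast = l
    induction l using List.reverseRecOn with
    | nil => rfl
    | append_singleton l x ih =>
        simp only [List.foldl_append, List.filterMap_append, List.foldl_cons, List.foldl_nil,
          List.filterMap_cons, List.filterMap_nil, ih]
        by_cases hx : ((PySem.Str.splitMax? x ":" 1).getD []).head?.getD "" = "" <;> simp [hx]

-- '.'-join of xs ++ [c] extends the join of xs (xs ≠ [])
theorem pv_chars_join_snoc (sep : List Char) (xs : List (List Char)) (c : List Char)
    (h : xs ≠ []) :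
    PySem.Chars.join sep (xs ++ [c]) = PySem.Chars.join sep xs ++ sep ++ c := by
  induction xs with
  | nil => exact absurd rfl h
  | cons a t ih =>
      cases t with
      | nil =>
          rw [List.cons_append, List.nil_append, PySem.Chars.join_cons_cons,
            PySem.Chars.join_singleton, PySem.Chars.join_singleton]
      | cons b t' =>
          simp only [List.cons_append]
          rw [PySem.Chars.join_cons_cons,
            show PySem.Chars.join sep (b :: (t' ++ [c]))
              = PySem.Chars.join sep ((b :: t') ++ [c]) from rfl,
            ih (by simp), PySem.Chars.join_cons_cons]
          simp [List.append_assoc]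

theorem pv_join_snoc (xs : List String) (c : String) (h : xs ≠ []) :
    PySem.Str.join "." (xs ++ [c]) = PySem.Str.join "." [PySem.Str.join "." xs, c] := by
  apply String.toList_inj.mp
  rw [PySem.Str.toList_join, PySem.Str.toList_join, List.map_append, List.map_cons,
    List.map_cons, List.map_nil, PySem.Str.toList_join]
  rw [pv_chars_join_snoc _ _ _ (by simpa using h)]
  simp [PySem.Chars.join_cons_cons, PySem.Chars.join_singleton]

-- pvBump as a pointwise mapIdx
theorem pv_bump_eq_mapIdx (cs : List (PySem.Dict String Int)) (s : Nat) (pref : String) :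
    pvBump cs (s : Int) pref = cs.mapIdx (fun l d => if l = s then d.modify pref 0 (· + 1) else d) := by
  unfold pvBump
  rw [PySem.List.pyGet?_natCast]
  by_cases hs : s < cs.length
  · simp only [List.getElem?_eq_getElem hs, Int.toNat_natCast]
    apply List.ext_getElem
    · simp
    · intro i h1 h2
      rw [List.getElem_set, List.getElem_mapIdx]
      by_cases hi : i = s
      · simp [hi]
      · have hsi : ¬ s = i := fun h => hi h.symm
        simp [hi, hsi]
  · rw [List.getElem?_eq_none (by omega)]
    apply Eq.symm
    apply List.ext_getElem
    · simp
    · intro i h1 h2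
      rw [List.getElem_mapIdx]
      have : ¬ i = s := by simp at h1; omega
      simp [this]

def pvBumpWith (o : Option String) (d : PySem.Dict String Int) : PySem.Dict String Int :=
  match o with
  | some pref => d.modify pref 0 (· + 1)
  | none => d

-- the enumerate-fold bumps index l with prefix ps[l - s]
theorem pv_enumFold (ps : List String) (s : Nat) (cs : List (PySem.Dict String Int)) :
    (PySem.List.enumerate ps (s : Int)).foldl (fun cs p => pvBump cs p.1 p.2) cs
      = cs.mapIdx (fun l d => if s ≤ l then pvBumpWith ps[l - s]? d else d) := by
  induction ps generalizing s cs with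
  | nil =>
      simp only [PySem.List.enumerate_nil, List.foldl_nil, List.getElem?_nil]
      have : (fun (l : Nat) (d : PySem.Dict String Int) =>
          if s ≤ l then pvBumpWith none d else d) = fun _ d => d := by
        funext l d; simp [pvBumpWith]
      rw [this, pv_mapIdx_id]
  | cons p ps ih =>
      rw [PySem.List.enumerate_cons, List.foldl_cons]
      have hcast : ((s : Int) + 1) = ((s + 1 : Nat) : Int) := by push_cast; ring
      rw [hcast, ih, pv_bump_eq_mapIdx, List.mapIdx_mapIdx]
      congr 1
      funext l d
      rcases Nat.lt_trichotomy l s with h | h | h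
      · have h1 : ¬ s + 1 ≤ l := by omega
        have h2 : ¬ l = s := by omega
        have h3 : ¬ s ≤ l := by omega
        simp [h1, h2, h3]
      · subst h
        have h1 : ¬ l + 1 ≤ l := by omega
        simp [h1, pvBumpWith]
      · have h1 : s + 1 ≤ l := by omega
        have h2 : ¬ l = s := by omega
        have h3 : s ≤ l := by omega
        have h4 : l - s = (l - (s + 1)) + 1 := by omega
        simp [h1, h2, h3, h4]

-- the materialized prefix list, indexwise
theorem pv_prefixes_getElem? (insts : List String) (max_levels : Int) (l : Nat) :
    (pvInstancePrefixes insts max_levels)[l]?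
      = if (l : Int) < max_levels ∧ l < insts.length
        then some (PySem.Str.join "." (insts.take (l + 1))) else none := by
  unfold pvInstancePrefixes
  rw [PySem.List.foldl_append_singleton_eq_map, List.nil_append, List.getElem?_map,
    PySem.List.getElem?_pyRange_one]
  by_cases h : (l : Int) < max_levels ∧ l < insts.length
  · have hl : l < (min max_levels (insts.length : Int) + 1 - 1).toNat := by omega
    have hc : (1 : Int) + l = ((l + 1 : Nat) : Int) := by push_cast; ring
    simp only [hl, if_pos, Option.map_some, hc, PySem.List.slice_to_natCast, h]
    simp
  · have hl : ¬ l < (min max_levels (insts.length : Int) + 1 - 1).toNat := by omega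
    simp [h]

-- per-node step of A, as a pointwise mapIdx
theorem pv_stepNode (node : String) (max_levels : Int) (cs : List (PySem.Dict String Int)) :
    (let insts := pvSplitInstanceSegments node
     if insts = [] then cs
     else (PySem.List.enumerate (pvInstancePrefixes insts max_levels)).foldl
       (fun cs p => pvBump cs p.1 p.2) cs)
    = cs.mapIdx (fun l d =>
        if (l : Int) < max_levels ∧ l < (pvSplitInstanceSegments node).length
        then d.modify (PySem.Str.join "." ((pvSplitInstanceSegments node).take (l + 1))) 0 (· + 1)
        else d) := by
  set insts := pvSplitInstanceSegments node with hi
  by_cases h : insts = []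
  · simp only [h, if_pos]
    have : (fun (l : Nat) (d : PySem.Dict String Int) =>
        if (l : Int) < max_levels ∧ l < (List.length ([] : List String))
        then d.modify (PySem.Str.join "." (List.take (l + 1) ([] : List String))) 0 (· + 1)
        else d) = fun _ d => d := by
      funext l d; simp
    rw [this, pv_mapIdx_id]
  · simp only [h, if_false]
    have h0 : ((0 : Nat) : Int) = (0 : Int) := rfl
    rw [← h0, pv_enumFold]
    congr 1
    funext l d
    simp only [Nat.zero_le, if_pos, Nat.sub_zero, pv_prefixes_getElem?]
    by_cases hc : (l : Int) < max_levels ∧ l < insts.length <;> simp [hc, pvBumpWith]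

-- A's whole fold over nodes, pointwise
theorem pv_foldA (nodes : List String) (max_levels : Int) (cs : List (PySem.Dict String Int)) :
    nodes.foldl (fun cs node =>
      let insts := pvSplitInstanceSegments node
      if insts = [] then cs
      else (PySem.List.enumerate (pvInstancePrefixes insts max_levels)).foldl
        (fun cs p => pvBump cs p.1 p.2) cs) cs
    = cs.mapIdx (fun l d => nodes.foldl (fun d node =>
        if (l : Int) < max_levels ∧ l < (pvSplitInstanceSegments node).length
        then d.modify (PySem.Str.join "." ((pvSplitInstanceSegments node).take (l + 1))) 0 (· + 1)
        else d) d) := by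
  induction nodes generalizing cs with
  | nil => simp only [List.foldl_nil]; rw [pv_mapIdx_id]
  | cons n ns ih =>
      rw [List.foldl_cons, ih, pv_stepNode, List.mapIdx_mapIdx]
      congr 1

-- pvStream over raw segments = the +1 fold over its event list (filtered cores)
theorem pv_stream_eq_evs (ml : Int) (segs : List String) (lvl : Int) (pref : String)
    (flat : PySem.Dict (Int × String) Int) :
    pvStream ml segs lvl pref flat
      = (pvEvs ml (segs.filterMap (fun seg =>
          let core := ((PySem.Str.splitMax? seg ":" 1).getD []).headD ""
          if core ≠ "" then some core else none)) lvl pref).foldl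
          (fun f e => f.modify e 0 (· + 1)) flat := by
  induction segs generalizing lvl pref flat with
  | nil => rfl
  | cons seg rest ih =>
      have hevs_stop : ∀ (L : List String) (q : String), ml ≤ lvl → pvEvs ml L lvl q = [] := by
        intro L q hb
        cases L with
        | nil => rfl
        | cons a t => simp [pvEvs, hb]
      simp only [pvStream, List.filterMap_cons]
      by_cases hb : ml ≤ lvl
      · simp only [hb, if_pos]
        by_cases hc : ((PySem.Str.splitMax? seg ":" 1).getD []).headD "" = ""
        · simp [hevs_stop _ _ hb]
        · simp [hevs_stop _ _ hb]
      · simp only [hb, if_false]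
        by_cases hc : ((PySem.Str.splitMax? seg ":" 1).getD []).headD "" = ""
        · simp only [hc, if_pos]
          rw [ih]
          simp [hc]
        · simp only [hc, if_neg, if_false]
          rw [ih]
          simp only [hc, ne_eq, not_false_iff, if_pos, pvEvs, hb, if_false, List.foldl_cons]
  

-- the events of one node, in closed range-map form
theorem pv_join_singleton (c : String) : PySem.Str.join "." [c] = c := by
  apply String.toList_inj.mp
  simp [PySem.Str.toList_join, PySem.Chars.join_singleton]

theorem pv_evs_closed (ml : Int) (insts rest pre : List String) (k : Nat)
    (hlen : pre.length = k) (hsplit : insts = pre ++ rest) :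
    pvEvs ml rest (k : Int) (PySem.Str.join "." pre)
      = (List.range ((min (ml - k) (rest.length : Int)).toNat)).map
          (fun j => (((k + j : Nat) : Int), pvKey insts (k + j))) := by
  induction rest generalizing pre k with
  | nil =>
      have h0 : (min (ml - k) ((List.length ([] : List String) : Int))).toNat = 0 := by
        simp only [List.length_nil, Int.natCast_zero]
        omega
      simp [pvEvs, h0]
  | cons c rest ih =>
      by_cases hb : ml ≤ (k : Int)
      · have h0 : (min (ml - k) ((c :: rest).length : Int)).toNat = 0 := by omega
        simp [pvEvs, hb, h0]
      · have hpref : (if (k : Int) = 0 then c else PySem.Str.join "." [PySem.Str.join "." pre, c])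
            = PySem.Str.join "." (pre ++ [c]) := by
          by_cases hk : (k : Int) = 0
          · have : pre = [] := by
              rw [← List.length_eq_zero_iff, hlen]
              omega
            simp [hk, this, pv_join_singleton]
          · have hpre : pre ≠ [] := by
              intro hc
              rw [hc] at hlen
              simp at hlen
              omega
            rw [if_neg hk, pv_join_snoc pre c hpre]
        rw [show pvEvs ml (c :: rest) (k : Int) (PySem.Str.join "." pre)
              = if ml ≤ (k : Int) then []
                else ((k : Int), if (k : Int) = 0 then c
                      else PySem.Str.join "." [PySem.Str.join "." pre, c]) ::
                  pvEvs ml rest ((k : Int) + 1)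
                    (if (k : Int) = 0 then c else PySem.Str.join "." [PySem.Str.join "." pre, c])
              from rfl]
        rw [if_neg hb, hpref]
        have hcast : (k : Int) + 1 = ((k + 1 : Nat) : Int) := by push_cast; ring
        rw [hcast, ih (pre ++ [c]) (k + 1) (by simp [hlen]) (by rw [hsplit]; simp)]
        have hkey : pvKey insts k = PySem.Str.join "." (pre ++ [c]) := by
          unfold pvKey
          rw [hsplit, List.take_append]
          have h1 : (k + 1) ⊓ pre.length = pre.length := by omega
          have h2 : k + 1 - pre.length = 1 := by omega
          rw [List.take_of_length_le (by omega), h2]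
          simp
        have hn : (min (ml - (k : Int)) (((c :: rest).length : Int))).toNat
            = (min (ml - ((k : Nat) + 1 : Nat)) ((rest.length : Int))).toNat + 1 := by
          simp only [List.length_cons]
          push_cast
          omega
        rw [hn, List.range_succ_eq_map, List.map_cons, List.map_map]
        congr 1
        · simp [hkey]
        · congr 1
          funext j
          have : k + 1 + j = k + (j + 1) := by omega
          simp [Function.comp, this]

theorem pv_evN_closed (node : String) (ml : Int) :
    pvEvN node ml
      = (List.range ((min ml ((pvInsts node).length : Int)).toNat)).map
          (fun (j : Nat) => ((j : Int), pvKey (pvInsts node) j)) := by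
  have hempty : ("" : String) = PySem.Str.join "." [] := by
    apply String.toList_inj.mp
    simp [PySem.Str.toList_join, PySem.Chars.join_nil]
  unfold pvEvN
  rw [hempty, show (0 : Int) = ((0 : Nat) : Int) from rfl,
    pv_evs_closed ml (pvInsts node) (pvInsts node) [] 0 rfl (by simp)]
  simp

-- count of p among level-l projections = count of the pair (l, p)
theorem pv_count_filterMap (E : List (Int × String)) (l : Nat) (p : String) :
    (E.filterMap (fun e => if e.1 = (l : Int) then some e.2 else none)).count p
      = E.count ((l : Int), p) := by
  induction E with
  | nil => rfl
  | cons e E ih =>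
      by_cases h : e.1 = (l : Int)
      · by_cases h2 : e.2 = p
        · have : e = ((l : Int), p) := Prod.ext h h2
          simp [List.filterMap_cons, h, this, List.count_cons, ih]
        · have : ¬ e = ((l : Int), p) := by
            intro hc; exact h2 (by rw [hc])
          simp [List.filterMap_cons, h, h2, this, List.count_cons, ih]
      · have : ¬ e = ((l : Int), p) := by
          intro hc; exact h (by rw [hc])
        simp [List.filterMap_cons, h, this, List.count_cons, ih]

-- first occurrences commute with restriction to one level
theorem pv_dedup_filterMap (E : List (Int × String)) (l : Nat) :
    ((PySem.Set.ofList E).filter (fun k => decide (k.1 = (l : Int)))).map (fun k => k.2)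
      = PySem.Set.ofList (E.filterMap (fun e => if e.1 = (l : Int) then some e.2 else none)) := by
  induction E using List.reverseRecOn with
  | nil => rfl
  | append_singleton E e ih =>
      rw [List.filterMap_append, PySem.Set.ofList_append_singleton, PySem.Set.add_eq_ite]
      by_cases hmem : e ∈ PySem.Set.ofList E
      · rw [if_pos hmem, ih]
        by_cases hl : e.1 = (l : Int)
        · have he2 : e.2 ∈ E.filterMap (fun e => if e.1 = (l : Int) then some e.2 else none) := by
            refine List.mem_filterMap.mpr ⟨e, (PySem.Set.mem_ofList _ _).mp hmem, by simp [hl]⟩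
          rw [show E.filterMap (fun e => if e.1 = (l : Int) then some e.2 else none) ++
                [e].filterMap (fun e => if e.1 = (l : Int) then some e.2 else none)
              = E.filterMap (fun e => if e.1 = (l : Int) then some e.2 else none) ++ [e.2] by
            simp [hl]]
          rw [PySem.Set.ofList_append_singleton, PySem.Set.add_eq_ite,
            if_pos (by rw [PySem.Set.mem_ofList]; exact he2)]
        · simp [hl]
      · rw [if_neg hmem, List.filter_append, List.map_append, ih]
        by_cases hl : e.1 = (l : Int)
        · have he2 : e.2 ∉ E.filterMap (fun e => if e.1 = (l : Int) then some e.2 else none) := by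
            intro hc
            rcases List.mem_filterMap.mp hc with ⟨e', he', heq⟩
            have : e' = e := by
              by_cases h1 : e'.1 = (l : Int)
              · rw [if_pos h1] at heq
                exact Prod.ext (by rw [h1, hl]) (by injection heq)
              · rw [if_neg h1] at heq
                exact absurd heq (by simp)
            exact hmem ((PySem.Set.mem_ofList _ _).mpr (this ▸ he'))
          rw [show [e].filterMap (fun e => if e.1 = (l : Int) then some e.2 else none) = [e.2] by
            simp [hl]]
          rw [PySem.Set.ofList_append_singleton, PySem.Set.add_eq_ite,
            if_neg (by rw [PySem.Set.mem_ofList]; exact he2)]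
          simp [hl]
        · simp [hl]

-- getD of the distribution fold
theorem pv_getD_fold (pairs : List ((Int × String) × Int)) (d : PySem.Dict String Int) (p : String) :
    (pairs.foldl (fun d q => d.modify q.1.2 0 (· + q.2)) d).getD p 0
      = d.getD p 0 + ((pairs.filter (fun q => q.1.2 == p)).map (fun q => q.2)).sum := by
  induction pairs generalizing d with
  | nil => simp
  | cons q pairs ih =>
      rw [List.foldl_cons, ih]
      by_cases h : q.1.2 = p
      · rw [PySem.Dict.getD_modify]
        simp [h]
        ring
      · rw [PySem.Dict.getD_modify]
        have h' : ¬ p = q.1.2 := fun hc => h hc.symm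
        simp [h, h']

-- the level-l event of one node: at most one, with A's condition and key
theorem pv_evN_level (node : String) (ml : Int) (l : Nat) :
    (pvEvN node ml).filterMap (fun e => if e.1 = (l : Int) then some e.2 else none)
      = if (l : Int) < ml ∧ l < (pvInsts node).length
        then [pvKey (pvInsts node) l] else [] := by
  rw [pv_evN_closed, List.filterMap_map]
  have hr : ∀ n : Nat, (List.range n).filterMap
        ((fun e : Int × String => if e.1 = (l : Int) then some e.2 else none) ∘
          (fun (j : Nat) => ((j : Int), pvKey (pvInsts node) j)))
      = if l < n then [pvKey (pvInsts node) l] else [] := by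
    intro n
    induction n with
    | zero => simp
    | succ n ih =>
        rw [List.range_succ, List.filterMap_append, ih]
        by_cases h1 : l < n
        · have h2 : l < n + 1 := by omega
          have h3 : ¬ ((n : Int) = (l : Int)) := by
            intro hc; omega
          simp [h1, h2, Function.comp]
          omega
        · by_cases h2 : l = n
          · subst h2
            simp [h1, Function.comp]
          · have h3 : ¬ l < n + 1 := by omega
            have h4 : ¬ ((n : Int) = (l : Int)) := by
              intro hc; omega
            simp [h1, h3, Function.comp]
            omega
  rw [hr]
  have : l < (min ml ((pvInsts node).length : Int)).toNat
      ↔ (l : Int) < ml ∧ l < (pvInsts node).length := by omega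
  by_cases h : (l : Int) < ml ∧ l < (pvInsts node).length
  · rw [if_pos (this.mpr h), if_pos h]
  · rw [if_neg (fun hc => h (this.mp hc)), if_neg h]

-- the level-l projection of all events = A's filtered key list
theorem pv_levE_eq (nodes : List String) (ml : Int) (l : Nat) :
    pvLevE nodes ml l
      = (nodes.filter (fun n => decide ((l : Int) < ml ∧ l < (pvInsts n).length))).map
          (fun n => pvKey (pvInsts n) l) := by
  unfold pvLevE pvAllE
  induction nodes with
  | nil => rfl
  | cons n ns ih =>
      rw [List.flatMap_cons, List.filterMap_append, ih, List.filter_cons]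
      by_cases h : (l : Int) < ml ∧ l < (pvInsts n).length
      · simp [pv_evN_level, h]
      · simp [pv_evN_level, h]

-- A's per-level fold is the Counter of the level's events
theorem pv_A_level (nodes : List String) (ml : Int) (l : Nat) :
    nodes.foldl (fun d node =>
        if (l : Int) < ml ∧ l < (pvSplitInstanceSegments node).length
        then d.modify (PySem.Str.join "." ((pvSplitInstanceSegments node).take (l + 1))) 0 (· + 1)
        else d) PySem.Dict.empty
      = PySem.Dict.counter (pvLevE nodes ml l) := by
  simp only [pv_segs_eq]
  rw [PySem.List.foldl_ite_eq_foldl_filter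
    (p := fun node => (l : Int) < ml ∧ l < (pvInsts node).length)
    (f := fun (d : PySem.Dict String Int) node =>
      d.modify (PySem.Str.join "." ((pvInsts node).take (l + 1))) 0 (· + 1))]
  rw [pv_levE_eq, PySem.Dict.counter_eq_foldl, List.foldl_map]
  rfl

-- pvBumpC as a pointwise mapIdx
theorem pv_bumpC_eq_mapIdx (cs : List (PySem.Dict String Int)) (s : Nat) (pref : String) (c : Int) :
    pvBumpC cs (s : Int) pref c
      = cs.mapIdx (fun l d => if l = s then d.modify pref 0 (· + c) else d) := by
  unfold pvBumpC
  rw [PySem.List.pyGet?_natCast]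
  by_cases hs : s < cs.length
  · simp only [List.getElem?_eq_getElem hs, Int.toNat_natCast]
    apply List.ext_getElem
    · simp
    · intro i h1 h2
      rw [List.getElem_set, List.getElem_mapIdx]
      by_cases hi : i = s
      · simp [hi]
      · have hsi : ¬ s = i := fun h => hi h.symm
        simp [hi, hsi]
  · rw [List.getElem?_eq_none (by omega)]
    apply Eq.symm
    apply List.ext_getElem
    · simp
    · intro i h1 h2
      rw [List.getElem_mapIdx]
      have : ¬ i = s := by simp at h1; omega
      simp [this]

-- the distribution fold over the flat Counter's items, pointwise per level
theorem pv_itemsFold (items : List ((Int × String) × Int)) (cs : List (PySem.Dict String Int))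
    (h : ∀ q ∈ items, ∃ s : Nat, q.1.1 = (s : Int) ∧ s < cs.length) :
    items.foldl (fun cs q => pvBumpC cs q.1.1 q.1.2 q.2) cs
      = cs.mapIdx (fun l d => items.foldl (fun d q =>
          if q.1.1 = (l : Int) then d.modify q.1.2 0 (· + q.2) else d) d) := by
  induction items generalizing cs with
  | nil => simp only [List.foldl_nil]; rw [pv_mapIdx_id]
  | cons q rest ih =>
      obtain ⟨s, hs, hlt⟩ := h q List.mem_cons_self
      rw [List.foldl_cons, hs, pv_bumpC_eq_mapIdx,
        ih _ (by
          intro q' hq'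
          obtain ⟨s', hs', hlt'⟩ := h q' (List.mem_cons_of_mem _ hq')
          exact ⟨s', hs', by simpa using hlt'⟩),
        List.mapIdx_mapIdx]
      congr 1
      funext l d
      rw [List.foldl_cons, hs]
      by_cases hl : l = s
      · subst hl
        simp
      · have : ¬ ((s : Int) = (l : Int)) := by
          intro hc; exact hl (by omega)
        simp [hl, this]

-- B's per-level distribution is the Counter of the level's events
theorem pv_B_level (nodes : List String) (ml : Int) (l : Nat) :
    (PySem.Dict.counter (pvAllE nodes ml)).items.foldl (fun d q =>
        if q.1.1 = (l : Int) then d.modify q.1.2 0 (· + q.2) else d) PySem.Dict.empty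
      = PySem.Dict.counter (pvLevE nodes ml l) := by
  rw [PySem.Dict.items_counter, List.foldl_map,
    PySem.List.foldl_ite_eq_foldl_filter
      (p := fun k : Int × String => k.1 = (l : Int))
      (f := fun (d : PySem.Dict String Int) (k : Int × String) =>
        d.modify k.2 0 (· + ((pvAllE nodes ml).count k : Int)))]
  set E := pvAllE nodes ml with hE
  set S := (PySem.Set.ofList E).filter (fun k => decide (k.1 = (l : Int))) with hS
  have hkeysS : (S.map (fun k => k.2)).Nodup := by
    apply List.Nodup.map_on
    · intro x hx y hy hxy
      have hx1 : x.1 = (l : Int) := by simpa using (List.mem_filter.mp hx).2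
      have hy1 : y.1 = (l : Int) := by simpa using (List.mem_filter.mp hy).2
      exact Prod.ext (by rw [hx1, hy1]) hxy
    · exact (PySem.Set.nodup_ofList E).filter _
  apply PySem.Dict.ext
  have hkeysL : (S.foldl (fun d k => d.modify k.2 0 (· + ((E.count k : Int)))) PySem.Dict.empty).keys
      = PySem.Set.ofList (pvLevE nodes ml l) := by
    rw [PySem.Dict.keys_foldl_modify_key S (fun k => k.2) 0
      (fun _ k => (· + ((E.count k : Int)))) PySem.Dict.empty]
    rw [PySem.Dict.keys_empty, PySem.Set.update_nil_left]
    rw [PySem.Set.ofList_eq_self_of_nodup _ hkeysS]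
    exact pv_dedup_filterMap E l
  have hgetD : ∀ p : String,
      (S.foldl (fun d k => d.modify k.2 0 (· + ((E.count k : Int)))) PySem.Dict.empty).getD p 0
        = ((pvLevE nodes ml l).count p : Int) := by
    intro p
    have hfold : S.foldl (fun d k => d.modify k.2 0 (· + ((E.count k : Int)))) PySem.Dict.empty
        = (S.map (fun k => (k, (E.count k : Int)))).foldl
            (fun d q => d.modify q.1.2 0 (· + q.2)) PySem.Dict.empty := by
      rw [List.foldl_map]
    rw [hfold, pv_getD_fold, PySem.Dict.getD_empty, List.filter_map]
    have hcomp : ((fun q : (Int × String) × Int => q.1.2 == p) ∘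
        (fun k : Int × String => (k, (E.count k : Int)))) = fun k : Int × String => k.2 == p := rfl
    rw [hcomp]
    have hfilter : S.filter (fun k : Int × String => k.2 == p)
        = (PySem.Set.ofList E).filter (fun k => k == ((l : Int), p)) := by
      rw [hS, List.filter_filter]
      apply List.filter_congr
      intro k _
      show ((k.2 == p) && decide (k.1 = (l : Int))) = (k == ((l : Int), p))
      by_cases h1 : k.1 = (l : Int) <;> by_cases h2 : k.2 = p
      · simp [h1, h2, Prod.ext_iff]
      · simp [h1, h2, Prod.ext_iff]
      · simp [h1, h2, Prod.ext_iff]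
      · simp [h1, h2, Prod.ext_iff]
    rw [hfilter, List.filter_beq]
    have hlev : pvLevE nodes ml l
        = E.filterMap (fun e => if e.1 = (l : Int) then some e.2 else none) := rfl
    by_cases hmem : ((l : Int), p) ∈ E
    · have h1 : List.count ((l : Int), p) (PySem.Set.ofList E) = 1 :=
        List.count_eq_one_of_mem (PySem.Set.nodup_ofList E)
          ((PySem.Set.mem_ofList _ _).mpr hmem)
      rw [hlev, pv_count_filterMap]
      simp [h1]
    · have h1 : List.count ((l : Int), p) (PySem.Set.ofList E) = 0 :=
        List.count_eq_zero.mpr (fun hc => hmem ((PySem.Set.mem_ofList _ _).mp hc))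
      rw [hlev, pv_count_filterMap]
      have h2 : E.count ((l : Int), p) = 0 := List.count_eq_zero.mpr hmem
      simp [h1, h2]
  rw [PySem.Dict.items_eq_map_keys _ (by rw [hkeysL]; exact PySem.Set.nodup_ofList _) (0 : Int),
    PySem.Dict.items_eq_map_keys _ (PySem.Dict.nodup_keys_counter _) (0 : Int),
    PySem.Dict.keys_counter, hkeysL]
  apply List.map_congr_left
  intro k _
  rw [hgetD k, PySem.Dict.getD_counter]

-- B's flat dict is the Counter of all events
theorem pv_flat (nodes : List String) (ml : Int) :
    nodes.foldl (fun flat node =>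
        pvStream ml
          (PySem.List.slice ((PySem.Str.split? node ".").getD []) none (some (-1))) 0 "" flat)
      PySem.Dict.empty
      = PySem.Dict.counter (pvAllE nodes ml) := by
  have hstep : ∀ (node : String) (flat : PySem.Dict (Int × String) Int),
      pvStream ml
          (PySem.List.slice ((PySem.Str.split? node ".").getD []) none (some (-1))) 0 "" flat
        = (pvEvN node ml).foldl (fun f e => f.modify e 0 (· + 1)) flat := by
    intro node flat
    rw [PySem.List.slice_to_neg_one, pv_stream_eq_evs]
    rfl
  have hfold : ∀ (ns : List String) (flat : PySem.Dict (Int × String) Int),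
      ns.foldl (fun flat node =>
          pvStream ml
            (PySem.List.slice ((PySem.Str.split? node ".").getD []) none (some (-1))) 0 "" flat)
        flat
      = (pvAllE ns ml).foldl (fun f e => f.modify e 0 (· + 1)) flat := by
    intro ns
    induction ns with
    | nil => intro flat; rfl
    | cons n t ih =>
        intro flat
        rw [List.foldl_cons, hstep, ih]
        unfold pvAllE
        rw [List.flatMap_cons, List.foldl_append]
  rw [hfold, PySem.Dict.counter_eq_foldl]

-- every flat key's level is a Nat below max_levels
theorem pv_key_bound (nodes : List String) (ml : Int) (q : (Int × String) × Int)
    (hq : q ∈ (PySem.Dict.counter (pvAllE nodes ml)).items) :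
    ∃ s : Nat, q.1.1 = (s : Int) ∧ s < ml.toNat := by
  have h1 : q.1 ∈ pvAllE nodes ml := by
    have := PySem.Dict.mem_keys_of_mem_items _ hq
    rw [PySem.Dict.keys_counter] at this
    exact (PySem.Set.mem_ofList _ _).mp this
  rcases List.mem_flatMap.mp h1 with ⟨node, _, hev⟩
  rw [pv_evN_closed] at hev
  rcases List.mem_map.mp hev with ⟨j, hj, hje⟩
  refine ⟨j, by rw [← hje], ?_⟩
  have := List.mem_range.mp hj
  omega

-- ===== VERDICT (by name: the statement is the Claim_ definition above) =====
theorem aggregate_by_level_spec : Claim_equal_aggregate_by_level := by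
  intro nodes max_levels _
  unfold Spec_aggregate_by_level aggregate_by_level aggregate_by_level_alt
  dsimp only
  rw [pv_foldA, pv_flat, pv_itemsFold _ _ (by
    intro q hq
    rcases pv_key_bound nodes max_levels q hq with ⟨s, hs, hlt⟩
    refine ⟨s, hs, ?_⟩
    rw [List.length_map, PySem.List.length_pyRange_one]
    omega)]
  refine congrArg₂ Prod.mk rfl ?_
  refine congrArg (List.map PySem.Dict.items) ?_
  apply List.ext_getElem
  · simp
  · intro i h1 h2
    rw [List.getElem_mapIdx, List.getElem_mapIdx]
    have hempty : ((PySem.List.pyRange 0 max_levels).map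
        (fun _ => (PySem.Dict.empty : PySem.Dict String Int)))[i]'(by
          simpa using (by simpa using h1)) = PySem.Dict.empty := by
      rw [List.getElem_map]
    rw [hempty, pv_A_level, pv_B_level]
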